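-- pv_equiv track=rewrite | github.com/CoVariance-Foundry/whidby | src/research_agent/places.py | _normalized_text
-- ===== SOURCE A (Python) =====
-- def _normalized_text(value: str) -> str:
--     chars: list[str] = []
--     previous_space = False
--     for char in value.lower().strip():
--         if char.isalnum():
--             chars.append(char)
--             previous_space = False
--         elif not previous_space:
--             chars.append(" ")
--             previous_space = True
--     return "".join(chars).strip()
-- ===== SOURCE B (Python) =====
-- def _normalized_text(value: str) -> str:
--     return " ".join("".join(c if c.isalnum() else " " for c in value.lower()).split())
-- ===== Notes on version B (the rewrite author's own statement) =====
-- stated objective: idiomatic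
-- what changed: Replaces the explicit accumulator loop with a previous_space flag by mapping each non-alphanumeric character to a space and letting str.split plus str.join collapse the runs and trim the ends.
import Mathlib
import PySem

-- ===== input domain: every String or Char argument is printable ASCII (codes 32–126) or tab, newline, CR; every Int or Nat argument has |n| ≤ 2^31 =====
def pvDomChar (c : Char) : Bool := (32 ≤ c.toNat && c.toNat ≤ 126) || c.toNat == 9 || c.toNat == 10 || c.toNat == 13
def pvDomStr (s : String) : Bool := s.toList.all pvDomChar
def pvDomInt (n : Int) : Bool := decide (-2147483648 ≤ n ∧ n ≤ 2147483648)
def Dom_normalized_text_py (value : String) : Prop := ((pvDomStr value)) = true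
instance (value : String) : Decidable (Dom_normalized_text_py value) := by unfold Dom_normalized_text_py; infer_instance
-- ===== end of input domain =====

-- B replaces A's explicit accumulator loop with a previous_space flag by mapping
-- non-alphanumerics to spaces and letting split()/join collapse runs and trim the ends.

-- ===== PORT A =====
-- A's for-loop: state = (chars accumulator, previous_space flag)
def ntLoopA : List Char → List Char → Bool → List Char
  | [], chars, _ => chars
  | c :: rest, chars, previous_space =>
    if PySem.Chars.isalnum c then ntLoopA rest (chars ++ [c]) false
    else if !previous_space then ntLoopA rest (chars ++ [' ']) true
    else ntLoopA rest chars previous_space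

def normalized_text_py (value : String) : String :=
  -- "".join(chars) of the appended single characters is the accumulated char list itself
  String.ofList (PySem.Chars.strip
    (ntLoopA (PySem.Chars.strip (PySem.Chars.lower value.toList)) [] false))

-- ===== PORT B =====
def normalized_text_py_alt (value : String) : String :=
  String.ofList (PySem.Chars.join [' ']
    (PySem.Chars.split₀
      ((PySem.Chars.lower value.toList).map
        (fun c => if PySem.Chars.isalnum c then c else ' '))))

-- ===== PRECONDITION & SPEC =====
def Spec_normalized_text_py (value : String) (out : String) : Prop := out = normalized_text_py_alt value
instance (value : String) (out : String) : Decidable (Spec_normalized_text_py value out) := by unfold Spec_normalized_text_py; infer_instance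

-- ===== CLAIM (what is proved, stated in full; the proofs are below) =====
def Claim_equal_normalized_text_py : Prop := ∀ (value : String), Dom_normalized_text_py value → Spec_normalized_text_py value (normalized_text_py value)

-- ===== LEMMAS AND PROOFS =====

def ntWords : List Char → List (List Char)
  | [] => []
  | c :: t =>
    if PySem.Chars.isalnum c then
      (c :: t.takeWhile PySem.Chars.isalnum) :: ntWords (t.dropWhile PySem.Chars.isalnum)
    else ntWords t
termination_by cs => cs.length
decreasing_by
  · exact Nat.lt_succ_of_le (List.length_dropWhile_le _ _)
  · exact Nat.lt_succ_self _

theorem alnum_not_space {c : Char} (h : PySem.Chars.isalnum c = true) : PySem.Chars.isspace c = false := by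
  simp only [PySem.Chars.isalnum, PySem.Chars.isalpha, PySem.Chars.isupper, PySem.Chars.islower,
    PySem.Chars.isdigit, PySem.Chars.isspace, Bool.or_eq_true, Bool.and_eq_true, decide_eq_true_eq,
    Bool.or_eq_false_iff, Bool.and_eq_false_iff, decide_eq_false_iff_not,
    Char.le_def, UInt32.le_iff_toNat_le, Char.toNat] at *
  have hA : 'A'.val.toNat = 65 := rfl
  have hZ : 'Z'.val.toNat = 90 := rfl
  have ha : 'a'.val.toNat = 97 := rfl
  have hz : 'z'.val.toNat = 122 := rfl
  have h0 : '0'.val.toNat = 48 := rfl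
  have h9 : '9'.val.toNat = 57 := rfl
  omega

theorem ntWords_all (cs : List Char) :
    ∀ w ∈ ntWords cs, w ≠ [] ∧ ∀ c ∈ w, PySem.Chars.isalnum c = true := by
  induction cs using ntWords.induct with
  | case1 => simp [ntWords]
  | case2 c t h ih =>
    rw [ntWords, if_pos h]
    intro w hw
    rcases List.mem_cons.1 hw with rfl | hw
    · refine ⟨by simp, ?_⟩
      intro x hx
      rcases List.mem_cons.1 hx with rfl | hx
      · exact h
      · exact List.mem_takeWhile_imp hx
    · exact ih w hw
  | case3 c t h ih =>
    rw [ntWords, if_neg h]; exact ih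

theorem ntWords_nil_all (cs : List Char) (h : ntWords cs = []) :
    ∀ c ∈ cs, PySem.Chars.isalnum c = false := by
  induction cs with
  | nil => simp
  | cons c t ih =>
    by_cases hc : PySem.Chars.isalnum c = true
    · rw [ntWords, if_pos hc] at h; simp at h
    · rw [ntWords, if_neg hc] at h
      intro x hx
      rcases List.mem_cons.1 hx with rfl | hx
      · simpa using hc
      · exact ih h x hx

theorem ntWords_junk_prefix (ws cs : List Char) (h : ∀ c ∈ ws, PySem.Chars.isalnum c = false) :
    ntWords (ws ++ cs) = ntWords cs := by
  induction ws with
  | nil => rfl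
  | cons w ws ih =>
    rw [List.cons_append, ntWords, if_neg (by simp [h w (by simp)])]
    exact ih (fun c hc => h c (by simp [hc]))


theorem ntWords_junk (ws : List Char) (h : ∀ c ∈ ws, PySem.Chars.isalnum c = false) :
    ntWords ws = [] := by
  induction ws with
  | nil => simp [ntWords]
  | cons w ws ih =>
    rw [ntWords, if_neg (by simp [h w (by simp)])]
    exact ih (fun c hc => h c (by simp [hc]))

theorem ntWords_junk_suffix (cs ws : List Char) (h : ∀ c ∈ ws, PySem.Chars.isalnum c = false) :
    ntWords (cs ++ ws) = ntWords cs := by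
  induction cs using ntWords.induct with
  | case1 => simpa [ntWords] using ntWords_junk ws h
  | case2 c t hc ih =>
    rw [List.cons_append, ntWords, if_pos hc, ntWords, if_pos hc]
    by_cases hd : t.dropWhile PySem.Chars.isalnum = []
    · have hall : ∀ x ∈ t, PySem.Chars.isalnum x = true := List.dropWhile_eq_nil_iff.1 hd
      have htw : t.takeWhile PySem.Chars.isalnum = t := List.takeWhile_eq_self_iff.2 hall
      have hwt : List.takeWhile PySem.Chars.isalnum ws = [] := by
        cases ws with
        | nil => rfl
        | cons a l => simp [List.takeWhile_cons, h a (by simp)]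
      have hwd : List.dropWhile PySem.Chars.isalnum ws = ws := by
        have := List.takeWhile_append_dropWhile (p := PySem.Chars.isalnum) (l := ws)
        rwa [hwt, List.nil_append] at this
      rw [List.takeWhile_append, if_pos (by rw [htw]), List.dropWhile_append,
        if_pos (by simp [hd]), htw, hwt, hwd, hd, List.append_nil,
        ntWords_junk ws h, ntWords_junk ([] : List Char) (by simp)]
    · have hlen : (t.takeWhile PySem.Chars.isalnum).length ≠ t.length := by
        intro hlen
        exact hd (by
          have := (List.takeWhile_prefix (p := PySem.Chars.isalnum) (l := t)).eq_of_length hlen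
          have h2 := List.takeWhile_append_dropWhile (p := PySem.Chars.isalnum) (l := t)
          rw [this] at h2
          simpa using h2)
      rw [List.takeWhile_append, if_neg hlen, List.dropWhile_append,
        if_neg (by simpa using hd)]
      rw [ih]
  | case3 c t hc ih =>
    rw [List.cons_append, ntWords, if_neg hc, ntWords, if_neg hc]; exact ih

theorem space_not_alnum {c : Char} (h : PySem.Chars.isspace c = true) : PySem.Chars.isalnum c = false := by
  by_cases ha : PySem.Chars.isalnum c = true
  · rw [alnum_not_space ha] at h; cases h
  · simpa using ha

theorem ntWords_strip (cs : List Char) : ntWords (PySem.Chars.strip cs) = ntWords cs := by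
  have h1 : ntWords (PySem.Chars.lstrip cs) = ntWords cs := by
    conv_rhs => rw [← List.takeWhile_append_dropWhile (p := PySem.Chars.isspace) (l := cs)]
    rw [ntWords_junk_prefix _ _ (fun c hc => space_not_alnum (List.mem_takeWhile_imp hc))]
    rfl
  have h2 : ntWords (PySem.Chars.rstrip (PySem.Chars.lstrip cs)) = ntWords (PySem.Chars.lstrip cs) := by
    set y := PySem.Chars.lstrip cs with hy
    have hdecomp : PySem.Chars.rstrip y ++ (List.takeWhile PySem.Chars.isspace y.reverse).reverse = y := by
      rw [PySem.Chars.rstrip, ← List.reverse_append, List.takeWhile_append_dropWhile,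
        List.reverse_reverse]
    conv_rhs => rw [← hdecomp]
    rw [ntWords_junk_suffix _ _ (fun c hc =>
      space_not_alnum (List.mem_takeWhile_imp (List.mem_reverse.1 hc)))]
  rw [PySem.Chars.strip, h2, h1]

theorem split₀_go_spec : ∀ n (t : List Char), t.length ≤ n →
    (∀ acc, PySem.Chars.split₀.go
        (t.map (fun c => if PySem.Chars.isalnum c then c else ' ')) [] acc
      = acc.reverse ++ ntWords t) ∧
    (∀ u acc, u ≠ [] → PySem.Chars.split₀.go
        (t.map (fun c => if PySem.Chars.isalnum c then c else ' ')) u acc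
      = acc.reverse ++ ((u.reverse ++ t.takeWhile PySem.Chars.isalnum)
          :: ntWords (t.dropWhile PySem.Chars.isalnum))) := by
  intro n
  induction n with
  | zero =>
    intro t ht
    have : t = [] := List.length_eq_zero_iff.1 (Nat.le_zero.1 ht)
    subst this
    constructor
    · intro acc; simp [PySem.Chars.split₀.go, ntWords]
    · intro u acc hu
      simp [PySem.Chars.split₀.go, List.isEmpty_eq_false_iff.2 hu, ntWords]
  | succ n ih =>
    intro t ht
    cases t with
    | nil =>
      constructor
      · intro acc; simp [PySem.Chars.split₀.go, ntWords]
      · intro u acc hu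
        simp [PySem.Chars.split₀.go, List.isEmpty_eq_false_iff.2 hu, ntWords]
    | cons c t' =>
      have ht' : t'.length ≤ n := by simpa using ht
      constructor
      · intro acc
        by_cases hc : PySem.Chars.isalnum c = true
        · rw [List.map_cons, if_pos hc, PySem.Chars.split₀.go,
            if_neg (by simp [alnum_not_space hc]),
            (ih t' ht').2 [c] acc (by simp), ntWords, if_pos hc]
          rfl
        · rw [List.map_cons, if_neg hc, PySem.Chars.split₀.go,
            if_pos (by decide), if_pos (by simp), (ih t' ht').1 acc,
            ntWords, if_neg hc]
      · intro u acc hu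
        by_cases hc : PySem.Chars.isalnum c = true
        · rw [List.map_cons, if_pos hc, PySem.Chars.split₀.go,
            if_neg (by simp [alnum_not_space hc]),
            (ih t' ht').2 (c :: u) acc (by simp),
            List.takeWhile_cons, if_pos hc, List.dropWhile_cons, if_pos hc]
          simp
        · rw [List.map_cons, if_neg hc, PySem.Chars.split₀.go,
            if_pos (by decide), if_neg (by simp [List.isEmpty_eq_false_iff.2 hu]),
            (ih t' ht').1 (u.reverse :: acc),
            List.takeWhile_cons, if_neg hc, List.dropWhile_cons, if_neg hc,
            ntWords, if_neg hc]
          simp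

theorem split₀_map_eq_ntWords (cs : List Char) :
    PySem.Chars.split₀ (cs.map (fun c => if PySem.Chars.isalnum c then c else ' ')) = ntWords cs := by
  have := (split₀_go_spec cs.length cs le_rfl).1 []
  simpa [PySem.Chars.split₀] using this

def ntSimp : List Char → Bool → List Char
  | [], _ => []
  | c :: t, previous_space =>
    if PySem.Chars.isalnum c then c :: ntSimp t false
    else if !previous_space then ' ' :: ntSimp t true
    else ntSimp t previous_space

def ntEndsJunk (cs : List Char) : Bool :=
  match cs.getLast? with
  | some c => !PySem.Chars.isalnum c
  | none => false

theorem ntSimp_word (t : List Char) :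
    ntSimp t false = t.takeWhile PySem.Chars.isalnum ++ ntSimp (t.dropWhile PySem.Chars.isalnum) false := by
  induction t with
  | nil => simp
  | cons c t ih =>
    by_cases hc : PySem.Chars.isalnum c = true
    · rw [ntSimp, if_pos hc, List.takeWhile_cons, if_pos hc, List.dropWhile_cons, if_pos hc,
        List.cons_append, ih]
    · rw [List.takeWhile_cons, if_neg hc, List.dropWhile_cons, if_neg hc, List.nil_append]

theorem ntEndsJunk_append (p d : List Char) (hd : d ≠ []) :
    ntEndsJunk (p ++ d) = ntEndsJunk d := by
  rw [ntEndsJunk, ntEndsJunk, List.getLast?_append, List.getLast?_eq_some_getLast hd]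
  simp

theorem ntSimp_true : ∀ n (cs : List Char), cs.length ≤ n →
    ntSimp cs true =
      (if ntWords cs = [] then []
       else PySem.Chars.join [' '] (ntWords cs) ++ if ntEndsJunk cs then [' '] else []) := by
  intro n
  induction n with
  | zero =>
    intro cs h
    have : cs = [] := List.length_eq_zero_iff.1 (Nat.le_zero.1 h)
    subst this; simp [ntSimp, ntWords]
  | succ n ih =>
    intro cs h
    cases cs with
    | nil => simp [ntSimp, ntWords]
    | cons c t =>
      have ht : t.length ≤ n := by simpa using h
      by_cases hc : PySem.Chars.isalnum c = true
      · rw [ntSimp, if_pos hc, ntSimp_word, ntWords, if_pos hc]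
        cases hd : List.dropWhile PySem.Chars.isalnum t with
        | nil =>
          have htw : t.takeWhile PySem.Chars.isalnum = t := by
            have := List.takeWhile_append_dropWhile (p := PySem.Chars.isalnum) (l := t)
            rwa [hd, List.append_nil] at this
          have hall : ∀ x ∈ c :: t, PySem.Chars.isalnum x = true := by
            intro x hx
            rcases List.mem_cons.1 hx with rfl | hx
            · exact hc
            · exact List.mem_takeWhile_imp (htw ▸ hx)
          have hjunk : ntEndsJunk (c :: t) = false := by
            rw [ntEndsJunk, List.getLast?_eq_some_getLast (List.cons_ne_nil c t)]
            simp [hall _ (List.getLast_mem _)]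
          have h1 : ntSimp ([] : List Char) false = [] := by simp [ntSimp]
          have h2 : ntWords ([] : List Char) = [] := by simp [ntWords]
          rw [h1, h2, if_neg (by simp), PySem.Chars.join_singleton, hjunk]
          simp
        | cons x d' =>
          have hx : PySem.Chars.isalnum x = false := by
            have := List.head_dropWhile_not PySem.Chars.isalnum (l := t) (by rw [hd]; simp)
            simpa [hd] using this
          have hs1 : ntSimp (x :: d') false = ' ' :: ntSimp d' true := by
            rw [ntSimp, if_neg (by simp [hx])]; simp
          have hs2 : ntSimp (x :: d') true = ntSimp d' true := by
            rw [ntSimp, if_neg (by simp [hx])]; simp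
          have hlen : (x :: d').length ≤ n := by
            have := List.length_dropWhile_le PySem.Chars.isalnum t
            rw [hd] at this
            omega
          have hrec := ih (x :: d') hlen
          rw [hs2] at hrec
          have hsplit : c :: t = (c :: t.takeWhile PySem.Chars.isalnum) ++ (x :: d') := by
            rw [← hd, List.cons_append, List.takeWhile_append_dropWhile]
          have hjunkeq : ntEndsJunk (c :: t) = ntEndsJunk (x :: d') := by
            rw [hsplit]; exact ntEndsJunk_append _ _ (by simp)
          rw [hs1, hrec, hjunkeq]
          cases hwd : ntWords (x :: d') with
          | nil =>
            have hjunk : ntEndsJunk (x :: d') = true := by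
              rw [ntEndsJunk, List.getLast?_eq_some_getLast (List.cons_ne_nil x d')]
              simp [ntWords_nil_all _ hwd _ (List.getLast_mem _)]
            rw [if_pos rfl, if_neg (List.cons_ne_nil _ _), PySem.Chars.join_singleton, hjunk,
              if_pos rfl]
            simp
          | cons w2 rest =>
            rw [if_neg (List.cons_ne_nil _ _), if_neg (List.cons_ne_nil _ _),
              PySem.Chars.join_cons_cons]
            simp
      · rw [ntSimp, if_neg hc, ntWords, if_neg hc]
        simp only [Bool.not_true, Bool.false_eq_true, if_false]
        rw [ih t ht]
        cases hwt : ntWords t with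
        | nil => simp
        | cons w rest =>
          have htne : t ≠ [] := by rintro rfl; simp [ntWords] at hwt
          have : ntEndsJunk (c :: t) = ntEndsJunk t := by
            rw [ntEndsJunk, ntEndsJunk]
            cases t with
            | nil => exact absurd rfl htne
            | cons a l => rw [List.getLast?_cons_cons]
          rw [this]

theorem rstrip_append_space (y : List Char) :
    PySem.Chars.rstrip (y ++ [' ']) = PySem.Chars.rstrip y := by
  rw [PySem.Chars.rstrip, PySem.Chars.rstrip, List.reverse_append]
  rfl

theorem strip_cons_space (x : List Char) :
    PySem.Chars.strip (' ' :: x) = PySem.Chars.strip x := by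
  rw [PySem.Chars.strip, PySem.Chars.strip, PySem.Chars.lstrip, PySem.Chars.lstrip,
    List.dropWhile_cons, if_pos (by decide)]

theorem strip_append_space (x : List Char) :
    PySem.Chars.strip (x ++ [' ']) = PySem.Chars.strip x := by
  rw [PySem.Chars.strip, PySem.Chars.strip, PySem.Chars.lstrip, PySem.Chars.lstrip,
    List.dropWhile_append]
  by_cases he : (List.dropWhile PySem.Chars.isspace x).isEmpty = true
  · rw [if_pos he, List.isEmpty_iff.1 he]
    rfl
  · rw [if_neg he]
    exact rstrip_append_space _

theorem join_reverse_head (ws : List (List Char)) (hne : ws ≠ [])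
    (hgood : ∀ w ∈ ws, w ≠ [] ∧ ∀ c ∈ w, PySem.Chars.isalnum c = true) :
    ∃ c r, (PySem.Chars.join [' '] ws).reverse = c :: r ∧ PySem.Chars.isalnum c = true := by
  induction ws with
  | nil => exact absurd rfl hne
  | cons w ws ih =>
    cases ws with
    | nil =>
      rw [PySem.Chars.join_singleton]
      cases hw : w.reverse with
      | nil => exact absurd (by simpa using congrArg List.reverse hw) (hgood w (by simp)).1
      | cons c r =>
        exact ⟨c, r, rfl, (hgood w (by simp)).2 c (List.mem_reverse.1 (by rw [hw]; simp))⟩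
    | cons q rest =>
      obtain ⟨c, r, hr, hcal⟩ := ih (by simp) (fun v hv => hgood v (by simp [List.mem_cons.1 hv]))
      refine ⟨c, r ++ ([' '] ++ w.reverse), ?_, hcal⟩
      rw [PySem.Chars.join_cons_cons, List.append_assoc, List.reverse_append,
        List.reverse_append, hr]
      simp

theorem strip_join (ws : List (List Char)) (hne : ws ≠ [])
    (hgood : ∀ w ∈ ws, w ≠ [] ∧ ∀ c ∈ w, PySem.Chars.isalnum c = true) :
    PySem.Chars.strip (PySem.Chars.join [' '] ws) = PySem.Chars.join [' '] ws := by
  have hl : PySem.Chars.lstrip (PySem.Chars.join [' '] ws) = PySem.Chars.join [' '] ws := by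
    cases ws with
    | nil => exact absurd rfl hne
    | cons w ws =>
      obtain ⟨hc0, hal0⟩ := hgood w (by simp)
      cases hw2 : w with
      | nil => exact absurd hw2 hc0
      | cons hc w' =>
        subst hw2
        have hns : PySem.Chars.isspace hc = false :=
          alnum_not_space (hal0 hc (by simp))
        have : ∃ r, PySem.Chars.join [' '] ((hc :: w') :: ws) = hc :: r := by
          cases ws with
          | nil => exact ⟨w', by rw [PySem.Chars.join_singleton]⟩
          | cons q rest =>
            exact ⟨w' ++ ([' '] ++ PySem.Chars.join [' '] (q :: rest)), by
              rw [PySem.Chars.join_cons_cons]; simp⟩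
        obtain ⟨r, hr⟩ := this
        rw [hr, PySem.Chars.lstrip, List.dropWhile_cons, if_neg (by simp [hns])]
  have hrs : PySem.Chars.rstrip (PySem.Chars.join [' '] ws) = PySem.Chars.join [' '] ws := by
    obtain ⟨c, r, hr, hcal⟩ := join_reverse_head ws hne hgood
    rw [PySem.Chars.rstrip, hr, List.dropWhile_cons, if_neg (by simp [alnum_not_space hcal]),
      ← hr, List.reverse_reverse]
  rw [PySem.Chars.strip, hl, hrs]

theorem strip_ntSimp_false (cs : List Char) :
    PySem.Chars.strip (ntSimp cs false) = PySem.Chars.join [' '] (ntWords cs) := by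
  have key : PySem.Chars.strip (ntSimp cs false) = PySem.Chars.strip (ntSimp cs true) := by
    cases cs with
    | nil => rfl
    | cons c t =>
      by_cases hc : PySem.Chars.isalnum c = true
      · rw [ntSimp, if_pos hc, ntSimp, if_pos hc]
      · rw [ntSimp, if_neg hc, ntSimp, if_neg hc]
        simp only [Bool.not_true, Bool.not_false, Bool.false_eq_true, if_false, if_pos]
        exact strip_cons_space _
  rw [key, ntSimp_true cs.length cs le_rfl]
  cases hw : ntWords cs with
  | nil => rw [if_pos rfl, PySem.Chars.join_nil]; rfl
  | cons w rest =>
    rw [if_neg (List.cons_ne_nil _ _)]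
    have hgood := hw ▸ ntWords_all cs
    cases ntEndsJunk cs with
    | false =>
      rw [if_neg (by simp), List.append_nil]
      exact strip_join _ (List.cons_ne_nil _ _) hgood
    | true =>
      rw [if_pos rfl, strip_append_space]
      exact strip_join _ (List.cons_ne_nil _ _) hgood

theorem ntLoopA_eq (cs : List Char) : ∀ chars prev, ntLoopA cs chars prev = chars ++ ntSimp cs prev := by
  induction cs with
  | nil => simp [ntLoopA, ntSimp]
  | cons c t ih =>
    intro chars prev
    simp only [ntLoopA, ntSimp]
    split_ifs <;> simp [ih]

-- ===== VERDICT (by name: the statement is the Claim_ definition above) =====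
theorem normalized_text_py_spec : Claim_equal_normalized_text_py := by
  intro v _
  unfold Spec_normalized_text_py normalized_text_py normalized_text_py_alt
  rw [ntLoopA_eq, List.nil_append, strip_ntSimp_false, split₀_map_eq_ntWords, ntWords_strip]
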